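-- pv_equiv track=rewrite | github.com/Alleyfoo/Tyopaikka-tutka | src/apprscan/inspector.py | get_prev_next
-- ===== SOURCE A (Python) =====
-- from typing import Dict, Iterable, Tuple
--
-- def get_prev_next(view_ids: Iterable[str], current_bid: str) -> Tuple[str | None, str | None]:
--     ids = [str(x) for x in view_ids]
--     if not ids or current_bid not in ids:
--         return None, None
--     idx = ids.index(current_bid)
--     prev_bid = ids[idx - 1] if idx > 0 else None
--     next_bid = ids[idx + 1] if idx < len(ids) - 1 else None
--     return prev_bid, next_bid
-- ===== SOURCE B (Python) =====
-- def get_prev_next(view_ids, current_bid):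
--     # single streaming pass: track the previously seen id; on the first match,
--     # the next iterated element (if any) is the successor
--     prev = None
--     found = False
--     for x in view_ids:
--         s = str(x)
--         if found:
--             return prev, s
--         if s == current_bid:
--             found = True
--         else:
--             prev = s
--     if found:
--         return prev, None
--     return None, None
-- ===== Notes on version B (the rewrite author's own statement) =====
-- stated objective: alternative
-- what changed: Replaced materialize-then-index (membership test, list.index, index arithmetic) by one streaming pass that keeps a sliding previous element and a found flag, returning the successor as soon as it is seen.
import Mathlib
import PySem

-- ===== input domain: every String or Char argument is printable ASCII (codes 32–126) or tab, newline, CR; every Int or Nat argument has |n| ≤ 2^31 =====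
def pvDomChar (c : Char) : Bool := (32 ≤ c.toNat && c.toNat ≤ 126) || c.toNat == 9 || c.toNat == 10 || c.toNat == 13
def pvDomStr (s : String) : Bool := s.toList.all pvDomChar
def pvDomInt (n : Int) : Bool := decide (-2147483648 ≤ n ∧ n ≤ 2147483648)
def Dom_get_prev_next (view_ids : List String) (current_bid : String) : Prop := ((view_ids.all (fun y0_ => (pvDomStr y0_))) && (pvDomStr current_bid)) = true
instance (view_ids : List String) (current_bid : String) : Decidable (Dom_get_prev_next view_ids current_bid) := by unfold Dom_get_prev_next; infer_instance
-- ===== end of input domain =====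

-- B replaces membership-test + list.index + index arithmetic by one streaming pass with sliding prev state (alternative decomposition; same return value).


-- ===== PORT A =====
-- str(x) on a str is the identity, so 'ids = [str(x) for x in view_ids]' is a map of the identity.
def get_prev_next (view_ids : List String) (current_bid : String) : Option String × Option String :=
  let ids := view_ids.map (fun x => x)
  if ids = [] ∨ ¬ ids.contains current_bid then (none, none)
  else
    match PySem.List.index? ids current_bid with
    | none => (none, none)  -- unreachable: current_bid ∈ ids
    | some idx =>
      let prev_bid := if (idx : Int) > 0 then PySem.List.pyGet? ids ((idx : Int) - 1) else none
      let next_bid := if (idx : Int) < (ids.length : Int) - 1 then PySem.List.pyGet? ids ((idx : Int) + 1) else none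
      (prev_bid, next_bid)

-- ===== PORT B =====
-- loop with found = True: the next element (head of the rest) is the answer
def gpnAfter (prev : Option String) : List String → Option String × Option String
  | [] => (prev, none)
  | s :: _ => (prev, some s)

-- loop with found = False: slide prev, or switch to gpnAfter on a match
def gpnScan (prev : Option String) (cur : String) : List String → Option String × Option String
  | [] => (none, none)
  | s :: rest => if s = cur then gpnAfter prev rest else gpnScan (some s) cur rest

def get_prev_next_alt (view_ids : List String) (current_bid : String) : Option String × Option String :=
  gpnScan none current_bid view_ids

-- ===== PRECONDITION & SPEC =====
def Spec_get_prev_next (view_ids : List String) (current_bid : String) (out : Option String × Option String) : Prop := out = get_prev_next_alt view_ids current_bid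
instance (view_ids : List String) (current_bid : String) (out : Option String × Option String) : Decidable (Spec_get_prev_next view_ids current_bid out) := by unfold Spec_get_prev_next; infer_instance

-- ===== CLAIM (what is proved, stated in full; the proofs are below) =====
def Claim_equal_get_prev_next : Prop := ∀ (view_ids : List String) (current_bid : String), Dom_get_prev_next view_ids current_bid → Spec_get_prev_next view_ids current_bid (get_prev_next view_ids current_bid)

-- ===== LEMMAS AND PROOFS =====

-- characterization of the streaming loop in terms of index? and pyGet?
theorem gpnScan_eq_index (cur : String) : ∀ (l : List String) (prev : Option String),
    gpnScan prev cur l =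
      match PySem.List.index? l cur with
      | none => (none, none)
      | some i => ((if i = 0 then prev else PySem.List.pyGet? l ((i : Int) - 1)),
                   PySem.List.pyGet? l ((i : Int) + 1)) := by
  intro l
  induction l with
  | nil => intro prev; simp [gpnScan, PySem.List.index?]
  | cons s rest ih =>
    intro prev
    by_cases h : s = cur
    · subst h
      rw [PySem.List.index?_cons_self]
      simp only [gpnScan]
      cases rest with
      | nil => simp [gpnAfter, PySem.List.pyGet?, PySem.List.pyIdx?]
      | cons t ts =>
        simp only [gpnAfter]
        rw [PySem.List.pyGet?_cons_succ, PySem.List.pyGet?_natCast]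
        simp
    · rw [PySem.List.index?_cons_of_ne rest h]
      simp only [gpnScan, if_neg h]
      rw [ih (some s)]
      cases hi : PySem.List.index? rest cur with
      | none => simp
      | some i =>
        simp only [Option.map_some, Prod.mk.injEq]
        refine ⟨?_, ?_⟩
        · cases i with
          | zero =>
            rw [if_pos rfl, if_neg (by omega : ¬ (0 + 1 = 0))]
            rw [show ((0 + 1 : Nat) : Int) - 1 = ((0 : Nat) : Int) from by norm_num,
                PySem.List.pyGet?_natCast]
            simp
          | succ k =>
            rw [if_neg (by omega : ¬ (k + 1 = 0)), if_neg (by omega : ¬ (k + 1 + 1 = 0))]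
            rw [show ((k + 1 + 1 : Nat) : Int) - 1 = ((k : Nat) : Int) + 1 from by push_cast; ring,
                PySem.List.pyGet?_cons_succ,
                show ((k : Nat) : Int) = ((k + 1 : Nat) : Int) - 1 from by push_cast; ring]
        · rw [PySem.List.pyGet?_cons_succ,
              show ((i + 1 : Nat) : Int) = ((i : Nat) : Int) + 1 from by push_cast; ring]

theorem index?_lt_length {l : List String} {v : String} {i : Nat}
    (h : PySem.List.index? l v = some i) : i < l.length := by
  obtain ⟨hk, _, _⟩ := PySem.List.getElem_of_index?_eq_some h
  exact hk

-- ===== VERDICT (by name: the statement is the Claim_ definition above) =====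
theorem get_prev_next_spec : Claim_equal_get_prev_next := by
  intro view_ids current_bid _
  unfold Spec_get_prev_next get_prev_next get_prev_next_alt
  simp only [List.map_id_fun', id]
  rw [gpnScan_eq_index]
  by_cases hmem : current_bid ∈ view_ids
  · have hcontains : view_ids.contains current_bid := by simpa using hmem
    have hne : view_ids ≠ [] := by rintro rfl; simp at hmem
    rw [if_neg (by simp [hne]; exact hmem)]
    cases hi : PySem.List.index? view_ids current_bid with
    | none => exact absurd hmem ((PySem.List.index?_eq_none_iff _ _).mp hi)
    | some i =>
      have hlt : i < view_ids.length := index?_lt_length hi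
      simp only [Prod.mk.injEq]
      refine ⟨?_, ?_⟩
      · by_cases h0 : i = 0
        · subst h0; simp
        · rw [if_pos (by omega : ((i : Nat) : Int) > 0), if_neg h0]
      · by_cases hl : ((i : Nat) : Int) < (view_ids.length : Int) - 1
        · rw [if_pos hl]
        · rw [if_neg hl]
          symm
          rw [PySem.List.pyGet?_eq_none_iff]
          intro hr
          rcases hr with ⟨_, h2⟩
          omega
  · have hnc : ¬ view_ids.contains current_bid := by simpa using hmem
    rw [if_pos (Or.inr hnc), (PySem.List.index?_eq_none_iff _ _).mpr hmem]
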